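-- pv_equiv track=rewrite | github.com/younggns/solar | _01_get_data_byFrequency.py | check_judgment
-- ===== SOURCE A (Python) =====
-- def check_judgment(text):
--     if str(text) != str(text):
--         return -1
--     text = str(text)
--
--     yta = ['YTA', 'YWBTA', 'ESH']
--     nta = ['NTA', 'YWNBTA', 'NAH']
--     results = [0,0]
--     for elem in yta:
--         if elem in text:
--             results[0] = 1
--     for elem in nta:
--         if elem in text:
--             results[1] = 1
--     if sum(results) == 0:
--         return -1
--     if sum(results) == 2:
--         return 2
--     else:
--         return results.index(1)
-- ===== SOURCE B (Python) =====
-- def check_judgment(text):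
--     if str(text) != str(text):
--         return -1
--     text = str(text)
--     # Single left-to-right scan over positions: at each index, check which marker
--     # starts there and accumulate a 2-bit mask (bit 1 = YTA-group, bit 2 = NTA-group),
--     # then decode the mask with one table lookup.
--     markers = (('YTA', 1), ('YWBTA', 1), ('ESH', 1), ('NTA', 2), ('YWNBTA', 2), ('NAH', 2))
--     mask = 0
--     for i in range(len(text)):
--         for m, bit in markers:
--             if text.startswith(m, i):
--                 mask |= bit
--     return (-1, 0, 1, 2)[mask]
-- ===== Notes on version B (the rewrite author's own statement) =====
-- stated objective: alternative
-- what changed: Instead of six independent substring-membership scans feeding a results-list/sum/index cascade, B makes one left-to-right scan over all positions of the text, testing which marker starts at each position with startswith, accumulating a 2-bit mask, and decodes the mask with a single table lookup.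
import Mathlib
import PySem

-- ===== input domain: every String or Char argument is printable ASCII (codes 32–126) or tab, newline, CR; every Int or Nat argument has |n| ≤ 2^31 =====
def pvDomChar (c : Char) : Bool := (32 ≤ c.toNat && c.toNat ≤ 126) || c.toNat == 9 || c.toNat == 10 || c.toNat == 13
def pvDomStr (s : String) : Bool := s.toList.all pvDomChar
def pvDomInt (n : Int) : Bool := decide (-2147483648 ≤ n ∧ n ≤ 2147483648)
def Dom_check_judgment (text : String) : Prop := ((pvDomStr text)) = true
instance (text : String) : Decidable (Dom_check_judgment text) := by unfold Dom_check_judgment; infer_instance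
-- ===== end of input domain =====

-- B replaces A's six substring-membership scans plus results-list/sum/index cascade by ONE positional scan
-- accumulating a 2-bit mask (startswith at each index) decoded by a table lookup (objective: alternative).

-- ===== PORT A =====
-- str(text) != str(text) is False for every string; ported literally as decide (text ≠ text).
def check_judgment (text : String) : Int :=
  if decide (¬ (text = text)) then -1
  else
    let yta := ["YTA", "YWBTA", "ESH"]
    let nta := ["NTA", "YWNBTA", "NAH"]
    let results : Int × Int := yta.foldl (fun r elem => if PySem.Str.isIn elem text then (1, r.2) else r) (0, 0)
    let results : Int × Int := nta.foldl (fun r elem => if PySem.Str.isIn elem text then (r.1, 1) else r) results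
    if results.1 + results.2 = 0 then -1
    else if results.1 + results.2 = 2 then 2
    else
      -- results.index(1); the preceding sum tests guarantee a 1 is present, so the ValueError branch is unreachable
      match PySem.List.index? [results.1, results.2] (1 : Int) with
      | some i => (i : Int)
      | none   => 0

-- ===== PORT B =====
-- text.startswith(m, i) with 0 ≤ i ≤ len(text) is exactly startswith on text[i:]; ported as Chars.startswith on toList.drop.
def check_judgment_alt (text : String) : Int :=
  if decide (¬ (text = text)) then -1
  else
    let markers : List (List Char × Nat) :=
      [(['Y','T','A'], 1), (['Y','W','B','T','A'], 1), (['E','S','H'], 1),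
       (['N','T','A'], 2), (['Y','W','N','B','T','A'], 2), (['N','A','H'], 2)]
    let mask : Nat := (PySem.List.pyRange 0 (PySem.Str.len text) 1).foldl
      (fun mask i => markers.foldl
        (fun mask p => if PySem.Chars.startswith (text.toList.drop i.toNat) p.1 then mask ||| p.2 else mask)
        mask) 0
    match PySem.List.pyGet? [(-1 : Int), 0, 1, 2] (mask : Int) with
    | some v => v
    | none   => 0

-- ===== PRECONDITION & SPEC =====
def Spec_check_judgment (text : String) (out : Int) : Prop := out = check_judgment_alt text
instance (text : String) (out : Int) : Decidable (Spec_check_judgment text out) := by unfold Spec_check_judgment; infer_instance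

-- ===== CLAIM (what is proved, stated in full; the proofs are below) =====
def Claim_equal_check_judgment : Prop := ∀ (text : String), Dom_check_judgment text → Spec_check_judgment text (check_judgment text)

-- ===== LEMMAS AND PROOFS =====

-- inner loop over the six markers: sets the y-bit / n-bit according to which group starts at position i
theorem pv_inner (L : List Char) (i : Int) (mask : Nat) :
    ([(['Y','T','A'], 1), (['Y','W','B','T','A'], 1), (['E','S','H'], 1),
      (['N','T','A'], 2), (['Y','W','N','B','T','A'], 2), (['N','A','H'], 2)] :
        List (List Char × Nat)).foldl
      (fun mask p => if PySem.Chars.startswith (L.drop i.toNat) p.1 then mask ||| p.2 else mask) mask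
    = mask |||
      ((if (PySem.Chars.startswith (L.drop i.toNat) ['Y','T','A'] ||
            PySem.Chars.startswith (L.drop i.toNat) ['Y','W','B','T','A'] ||
            PySem.Chars.startswith (L.drop i.toNat) ['E','S','H']) then 1 else 0) |||
       (if (PySem.Chars.startswith (L.drop i.toNat) ['N','T','A'] ||
            PySem.Chars.startswith (L.drop i.toNat) ['Y','W','N','B','T','A'] ||
            PySem.Chars.startswith (L.drop i.toNat) ['N','A','H']) then 2 else 0)) := by
  simp only [List.foldl]
  by_cases h1 : PySem.Chars.startswith (L.drop i.toNat) ['Y','T','A'] = true <;>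
  by_cases h2 : PySem.Chars.startswith (L.drop i.toNat) ['Y','W','B','T','A'] = true <;>
  by_cases h3 : PySem.Chars.startswith (L.drop i.toNat) ['E','S','H'] = true <;>
  by_cases h4 : PySem.Chars.startswith (L.drop i.toNat) ['N','T','A'] = true <;>
  by_cases h5 : PySem.Chars.startswith (L.drop i.toNat) ['Y','W','N','B','T','A'] = true <;>
  by_cases h6 : PySem.Chars.startswith (L.drop i.toNat) ['N','A','H'] = true <;>
    simp [h1, h2, h3, h4, h5, h6, Nat.or_assoc]

-- outer loop: the mask accumulated over any list of positions
theorem pv_outer (L : List Char) (is : List Int) (mask : Nat) :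
    is.foldl
      (fun mask i => ([(['Y','T','A'], 1), (['Y','W','B','T','A'], 1), (['E','S','H'], 1),
        (['N','T','A'], 2), (['Y','W','N','B','T','A'], 2), (['N','A','H'], 2)] :
          List (List Char × Nat)).foldl
        (fun mask p => if PySem.Chars.startswith (L.drop i.toNat) p.1 then mask ||| p.2 else mask) mask)
      mask
    = mask |||
      ((if is.any (fun i => PySem.Chars.startswith (L.drop i.toNat) ['Y','T','A'] ||
            PySem.Chars.startswith (L.drop i.toNat) ['Y','W','B','T','A'] ||
            PySem.Chars.startswith (L.drop i.toNat) ['E','S','H']) then 1 else 0) |||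
       (if is.any (fun i => PySem.Chars.startswith (L.drop i.toNat) ['N','T','A'] ||
            PySem.Chars.startswith (L.drop i.toNat) ['Y','W','N','B','T','A'] ||
            PySem.Chars.startswith (L.drop i.toNat) ['N','A','H']) then 2 else 0)) := by
  induction is generalizing mask with
  | nil => simp
  | cons i is ih =>
    rw [List.foldl_cons, pv_inner, ih, List.any_cons, List.any_cons]
    by_cases hy : (PySem.Chars.startswith (L.drop i.toNat) ['Y','T','A'] ||
        PySem.Chars.startswith (L.drop i.toNat) ['Y','W','B','T','A'] ||
        PySem.Chars.startswith (L.drop i.toNat) ['E','S','H']) = true <;>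
    by_cases hn : (PySem.Chars.startswith (L.drop i.toNat) ['N','T','A'] ||
        PySem.Chars.startswith (L.drop i.toNat) ['Y','W','N','B','T','A'] ||
        PySem.Chars.startswith (L.drop i.toNat) ['N','A','H']) = true <;>
    by_cases hy' : is.any (fun i => PySem.Chars.startswith (L.drop i.toNat) ['Y','T','A'] ||
        PySem.Chars.startswith (L.drop i.toNat) ['Y','W','B','T','A'] ||
        PySem.Chars.startswith (L.drop i.toNat) ['E','S','H']) = true <;>
    by_cases hn' : is.any (fun i => PySem.Chars.startswith (L.drop i.toNat) ['N','T','A'] ||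
        PySem.Chars.startswith (L.drop i.toNat) ['Y','W','N','B','T','A'] ||
        PySem.Chars.startswith (L.drop i.toNat) ['N','A','H']) = true <;>
      simp [hy, hn, hy', hn', Nat.or_assoc]

-- "some position of the range starts with m" = "m is a substring"  (for nonempty m)
theorem pv_any_range (L : List Char) (m : List Char) (hm : m ≠ []) :
    ((PySem.List.pyRange 0 (L.length : Int) 1).any
        (fun i => PySem.Chars.startswith (L.drop i.toNat) m))
      = PySem.Chars.isIn m L := by
  rw [PySem.List.pyRange_one]
  cases h : PySem.Chars.isIn m L with
  | false =>
    simp only [List.any_map, List.any_eq_false]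
    intro k hk
    simp only [Function.comp]
    intro hsw
    rw [PySem.Chars.startswith_iff] at hsw
    have : PySem.Chars.isIn m L = true := by
      rw [← PySem.Chars.exists_prefix_drop_iff_isIn]
      exact ⟨(0 + (k : Int)).toNat, hsw⟩
    simp [h] at this
  | true =>
    obtain ⟨j, hj⟩ := (PySem.Chars.exists_prefix_drop_iff_isIn m L).mpr h
    have hjlt : j < L.length := by
      by_contra hge
      rw [not_lt] at hge
      rw [List.drop_eq_nil_of_le hge] at hj
      exact hm (List.prefix_nil.mp hj)
    simp only [List.any_map, List.any_eq_true]
    refine ⟨j, by simpa using List.mem_range.mpr hjlt, ?_⟩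
    simp only [Function.comp]
    rw [PySem.Chars.startswith_iff]
    simpa using hj

-- the boolean 'any (f || g)' splits
theorem pv_any_or {α : Type} (l : List α) (f g : α → Bool) :
    (l.any fun x => f x || g x) = (l.any f || l.any g) := by
  induction l with
  | nil => simp
  | cons a l ih => cases hfa : f a <;> cases hga : g a <;> simp [hfa, hga, ih]

-- ===== VERDICT (by name: the statement is the Claim_ definition above) =====
theorem check_judgment_spec : Claim_equal_check_judgment := by
  intro text _
  unfold Spec_check_judgment check_judgment check_judgment_alt
  have hlen : PySem.Str.len text = (text.toList.length : Int) := by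
    simp [PySem.Str.len]
  have e1 := pv_any_range text.toList ['Y','T','A'] (by decide)
  have e2 := pv_any_range text.toList ['Y','W','B','T','A'] (by decide)
  have e3 := pv_any_range text.toList ['E','S','H'] (by decide)
  have e4 := pv_any_range text.toList ['N','T','A'] (by decide)
  have e5 := pv_any_range text.toList ['Y','W','N','B','T','A'] (by decide)
  have e6 := pv_any_range text.toList ['N','A','H'] (by decide)
  simp only [hlen, pv_outer, pv_any_or, e1, e2, e3, e4, e5, e6]
  by_cases h1 : PySem.Chars.isIn ['Y','T','A'] text.toList = true <;>
  by_cases h2 : PySem.Chars.isIn ['Y','W','B','T','A'] text.toList = true <;>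
  by_cases h3 : PySem.Chars.isIn ['E','S','H'] text.toList = true <;>
  by_cases h4 : PySem.Chars.isIn ['N','T','A'] text.toList = true <;>
  by_cases h5 : PySem.Chars.isIn ['Y','W','N','B','T','A'] text.toList = true <;>
  by_cases h6 : PySem.Chars.isIn ['N','A','H'] text.toList = true <;>
    simp [h1, h2, h3, h4, h5, h6, PySem.List.index?, PySem.List.pyGet?, PySem.List.pyIdx?] <;> decide
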